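-- pv_equiv track=rewrite | github.com/misho104/yaslha | yaslha/utility.py | sort_blocks_default
-- ===== SOURCE A (Python) =====
-- from collections import OrderedDict
--
-- BLOCKS_DEFAULT_ORDER = [
--     'SPINFO', 'DCINFO', 'MODSEL', 'SMINPUTS', 'MINPAR', 'EXTPAR',
--     'VCKMIN', 'UPMNSIN', 'MSQ2IN', 'MSU2IN', 'MSD2IN', 'MSL2IN', 'MSE2IN', 'TUIN', 'TDIN', 'TEIN',
--     'MASS', 'NMIX', 'UMIX', 'VMIX', 'ALPHA', 'FRALPHA', 'HMIX', 'GAUGE', 'MSOFT',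
--     'MSQ2', 'MSU2', 'MSD2', 'MSL2', 'MSE2',
--     'STOPMIX', 'SBOTMIX', 'STAUMIX', 'USQMIX', 'DSQMIX', 'SELMIX', 'SNUMIX',
--     'AU', 'AD', 'AE', 'TU', 'TD', 'TE', 'YU', 'YD', 'YE',
-- ]   # type: List[str]
--
-- def sort_blocks_default(block_names):
--     # type: (List[str])->List[str]
--     """Sort block names according to specified order."""
--     result = []
--     block_names = [n.upper() for n in block_names]
--     peeked = OrderedDict([(k, False) for k in block_names])
--
--     for name in [n.upper() for n in BLOCKS_DEFAULT_ORDER]: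
--         if name in block_names:
--             result.append(name)
--             peeked[name] = True
--
--     return result + [k for k, v in peeked.items() if not v]
-- ===== SOURCE B (Python) =====
-- BLOCKS_DEFAULT_ORDER = [
--     'SPINFO', 'DCINFO', 'MODSEL', 'SMINPUTS', 'MINPAR', 'EXTPAR',
--     'VCKMIN', 'UPMNSIN', 'MSQ2IN', 'MSU2IN', 'MSD2IN', 'MSL2IN', 'MSE2IN', 'TUIN', 'TDIN', 'TEIN',
--     'MASS', 'NMIX', 'UMIX', 'VMIX', 'ALPHA', 'FRALPHA', 'HMIX', 'GAUGE', 'MSOFT',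
--     'MSQ2', 'MSU2', 'MSD2', 'MSL2', 'MSE2',
--     'STOPMIX', 'SBOTMIX', 'STAUMIX', 'USQMIX', 'DSQMIX', 'SELMIX', 'SNUMIX',
--     'AU', 'AD', 'AE', 'TU', 'TD', 'TE', 'YU', 'YD', 'YE',
-- ]
--
--
-- def sort_blocks_default(block_names):
--     """Sort block names according to specified order."""
--     order = {name.upper(): i for i, name in enumerate(BLOCKS_DEFAULT_ORDER)}
--     unique = dict.fromkeys(n.upper() for n in block_names)
--     return sorted(unique, key=lambda n: order.get(n, len(order)))
-- ===== Notes on version B (the rewrite author's own statement) =====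
-- stated objective: simpler
-- what changed: A scans the fixed BLOCKS_DEFAULT_ORDER list testing list membership in the input and keeps a flag dict to collect leftover names; B instead builds a name-to-index priority table once, deduplicates the uppercased input preserving first occurrence, and returns one stable sort by that priority (absent names get the sentinel key len(order)), so the scan-and-flag machinery disappears.
import Mathlib
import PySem

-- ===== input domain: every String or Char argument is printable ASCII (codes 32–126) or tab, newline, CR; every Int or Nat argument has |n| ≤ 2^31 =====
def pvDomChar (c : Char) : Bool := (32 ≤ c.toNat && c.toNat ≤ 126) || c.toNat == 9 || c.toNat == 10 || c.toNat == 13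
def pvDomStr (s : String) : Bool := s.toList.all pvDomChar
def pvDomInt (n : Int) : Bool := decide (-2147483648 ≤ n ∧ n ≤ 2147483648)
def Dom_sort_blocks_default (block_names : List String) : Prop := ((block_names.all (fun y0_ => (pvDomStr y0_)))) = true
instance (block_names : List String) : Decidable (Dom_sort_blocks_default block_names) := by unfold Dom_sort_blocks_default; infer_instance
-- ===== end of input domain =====

-- B replaces A's scan-the-fixed-order-list-with-membership-tests-plus-flag-dict strategy by an
-- index-table-and-stable-sort strategy (dedup the uppercased input, sort by priority index); objective: simpler.

def pvBlocksDefaultOrder : List String :=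
  ["SPINFO", "DCINFO", "MODSEL", "SMINPUTS", "MINPAR", "EXTPAR",
   "VCKMIN", "UPMNSIN", "MSQ2IN", "MSU2IN", "MSD2IN", "MSL2IN", "MSE2IN", "TUIN", "TDIN", "TEIN",
   "MASS", "NMIX", "UMIX", "VMIX", "ALPHA", "FRALPHA", "HMIX", "GAUGE", "MSOFT",
   "MSQ2", "MSU2", "MSD2", "MSL2", "MSE2",
   "STOPMIX", "SBOTMIX", "STAUMIX", "USQMIX", "DSQMIX", "SELMIX", "SNUMIX",
   "AU", "AD", "AE", "TU", "TD", "TE", "YU", "YD", "YE"]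

-- ===== PORT A =====
def sort_blocks_default (block_names : List String) : List String :=
  let bn := block_names.map PySem.Str.upper
  let peeked : PySem.Dict String Bool := PySem.Dict.ofList (bn.map (fun k => (k, false)))
  let st := (pvBlocksDefaultOrder.map PySem.Str.upper).foldl
      (fun (st : List String × PySem.Dict String Bool) name =>
        if name ∈ bn then (st.1 ++ [name], st.2.insert name true) else st)
      ([], peeked)
  st.1 ++ ((st.2.items.filter (fun kv => !kv.2)).map (fun kv => kv.1))

-- ===== PORT B =====
-- order = {name.upper(): i for i, name in enumerate(BLOCKS_DEFAULT_ORDER)}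
def pvOrderIndex : PySem.Dict String Int :=
  (PySem.List.enumerate pvBlocksDefaultOrder 0).foldl
    (fun d p => d.insert (PySem.Str.upper p.2) p.1) PySem.Dict.empty

-- key = lambda n: order.get(n, len(order))
def pvKey (n : String) : Int := pvOrderIndex.getD n (PySem.Dict.size pvOrderIndex : Int)

def sort_blocks_default_alt (block_names : List String) : List String :=
  PySem.List.sorted (PySem.List.dedup (block_names.map PySem.Str.upper)) pvKey false

-- ===== PRECONDITION & SPEC =====
def Spec_sort_blocks_default (block_names : List String) (out : List String) : Prop := out = sort_blocks_default_alt block_names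
instance (block_names : List String) (out : List String) : Decidable (Spec_sort_blocks_default block_names out) := by unfold Spec_sort_blocks_default; infer_instance

-- ===== CLAIM (what is proved, stated in full; the proofs are below) =====
def Claim_equal_sort_blocks_default : Prop := ∀ (block_names : List String), Dom_sort_blocks_default block_names → Spec_sort_blocks_default block_names (sort_blocks_default block_names)

-- ===== LEMMAS AND PROOFS =====

-- comparison function of B's stable sort, and the canonical form both programs compute
def pvBefore (a b : String) : Bool := decide (pvKey a < pvKey b)

def pvCanon (p : List String) : List String :=
  pvBlocksDefaultOrder.filter (fun o => decide (o ∈ p))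
    ++ p.filter (fun y => decide (y ∉ pvBlocksDefaultOrder))

theorem pv_upper_order : pvBlocksDefaultOrder.map PySem.Str.upper = pvBlocksDefaultOrder := by decide

theorem pv_order_nodup : pvBlocksDefaultOrder.Nodup := by decide

set_option maxRecDepth 40000 in
theorem pv_order_pairwise : pvBlocksDefaultOrder.Pairwise (fun a b => pvBefore a b = true) := by decide

set_option maxRecDepth 40000 in
theorem pv_key_lt : ∀ x ∈ pvBlocksDefaultOrder, pvKey x < 46 := by decide

set_option maxRecDepth 40000 in
theorem pv_keys : pvOrderIndex.keys = pvBlocksDefaultOrder := by decide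

set_option maxRecDepth 40000 in
theorem pv_size : (PySem.Dict.size pvOrderIndex : Int) = 46 := by decide

theorem pv_key_out (x : String) (hx : x ∉ pvBlocksDefaultOrder) : pvKey x = 46 := by
  have hc : pvOrderIndex.contains x = false := by
    cases hcc : pvOrderIndex.contains x with
    | false => rfl
    | true => exact absurd (pv_keys ▸ (PySem.Dict.contains_iff_mem_keys pvOrderIndex x).mp hcc) hx
  unfold pvKey
  rw [PySem.Dict.getD_of_not_contains _ _ hc, pv_size]

theorem pv_before_in_out (x y : String) (hx : x ∈ pvBlocksDefaultOrder)
    (hy : y ∉ pvBlocksDefaultOrder) : pvBefore x y = true := by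
  have h1 := pv_key_lt x hx
  have h2 := pv_key_out y hy
  simp [pvBefore]; omega

theorem pv_before_out (x y : String) (hx : x ∉ pvBlocksDefaultOrder)
    (hy : y ∈ pvBlocksDefaultOrder ∨ y ∉ pvBlocksDefaultOrder) : pvBefore x y = false := by
  have h1 := pv_key_out x hx
  have h2 : pvKey y ≤ 46 := by
    rcases hy with h | h
    · exact le_of_lt (pv_key_lt y h)
    · exact le_of_eq (pv_key_out y h)
  simp [pvBefore]; omega

theorem pv_insertBy_cons (before : String → String → Bool) (x : String) (ys : List String)
    (h : ∀ y ∈ ys, before x y = true) :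
    PySem.List.insertBy before x ys = x :: ys := by
  cases ys with
  | nil => simp [PySem.List.insertBy]
  | cons y ys => simp [PySem.List.insertBy, h y (by simp)]

theorem pv_insertBy_append_right (before : String → String → Bool) (x : String) (A B : List String)
    (hB : ∀ y ∈ B, before x y = true) :
    PySem.List.insertBy before x (A ++ B) = PySem.List.insertBy before x A ++ B := by
  induction A with
  | nil => simp [pv_insertBy_cons before x B hB, PySem.List.insertBy]
  | cons a A ih =>
    by_cases h : before x a = true
    · simp [PySem.List.insertBy, h]
    · simp [PySem.List.insertBy, h, ih]

theorem pv_insertBy_filter (before : String → String → Bool)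
    (hasym : ∀ a b, before a b = true → before b a = false) :
    ∀ (L : List String), L.Nodup → L.Pairwise (fun a b => before a b = true) →
    ∀ (x : String), x ∈ L →
    ∀ (P P' : String → Bool), P x = false → P' x = true → (∀ y, y ≠ x → P' y = P y) →
    PySem.List.insertBy before x (L.filter P) = L.filter P' := by
  intro L
  induction L with
  | nil => intro _ _ x hx; exact absurd hx (List.not_mem_nil)
  | cons a L ih =>
    intro hnd hpw x hx P P' hPx hP'x hagree
    have hnd' : L.Nodup := hnd.of_cons
    have hpw' : L.Pairwise (fun a b => before a b = true) := hpw.of_cons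
    rcases List.mem_cons.mp hx with rfl | hxL
    · -- x is the head
      have hxnot : x ∉ L := (List.nodup_cons.mp hnd).1
      have hfeq : L.filter P' = L.filter P :=
        List.filter_congr (fun y hy => hagree y (fun h => hxnot (h ▸ hy)))
      have hall : ∀ y ∈ L.filter P, before x y = true := by
        intro y hy
        exact (List.pairwise_cons.mp hpw).1 y (List.mem_of_mem_filter hy)
      have e1 : (x :: L).filter P = L.filter P := by simp [hPx]
      have e2 : (x :: L).filter P' = x :: L.filter P' := by simp [hP'x]
      rw [e1, e2, pv_insertBy_cons before x _ hall, hfeq]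
    · -- x is in the tail
      have hax : a ≠ x := fun h => (List.nodup_cons.mp hnd).1 (h ▸ hxL)
      have hbax : before a x = true := (List.pairwise_cons.mp hpw).1 x hxL
      have hbxa : before x a = false := hasym a x hbax
      have hPa : P' a = P a := hagree a hax
      by_cases hp : P a = true
      · have e1 : (a :: L).filter P = a :: L.filter P := by simp [hp]
        have e2 : (a :: L).filter P' = a :: L.filter P' := by
          simp [hPa, hp]
        rw [e1, e2, show PySem.List.insertBy before x (a :: L.filter P)
              = a :: PySem.List.insertBy before x (L.filter P) by
            simp [PySem.List.insertBy, hbxa]]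
        rw [ih hnd' hpw' x hxL P P' hPx hP'x hagree]
      · have hp' : P a = false := by simpa using hp
        have e1 : (a :: L).filter P = L.filter P := by simp [hp']
        have e2 : (a :: L).filter P' = L.filter P' := by simp [hPa, hp']
        rw [e1, e2]
        exact ih hnd' hpw' x hxL P P' hPx hP'x hagree

theorem pv_insert_canon (x : String) (p : List String) (hx : x ∉ p) :
    PySem.List.insertBy pvBefore x (pvCanon p) = pvCanon (p ++ [x]) := by
  unfold pvCanon
  by_cases hxo : x ∈ pvBlocksDefaultOrder
  · -- x has a priority index: it is inserted within the ordered part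
    have hB : ∀ y ∈ p.filter (fun y => decide (y ∉ pvBlocksDefaultOrder)), pvBefore x y = true := by
      intro y hy
      have := List.of_mem_filter hy
      exact pv_before_in_out x y hxo (by simpa using this)
    rw [pv_insertBy_append_right _ _ _ _ hB]
    have hasym : ∀ a b, pvBefore a b = true → pvBefore b a = false := by
      intro a b h
      simp only [pvBefore, decide_eq_true_eq] at h
      simp [pvBefore]; omega
    rw [pv_insertBy_filter pvBefore hasym pvBlocksDefaultOrder pv_order_nodup
        pv_order_pairwise x hxo
        (fun o => decide (o ∈ p)) (fun o => decide (o ∈ p ++ [x]))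
        (by simp [hx]) (by simp)
        (fun y hy => by simp [hy])]
    have : (p ++ [x]).filter (fun y => decide (y ∉ pvBlocksDefaultOrder))
        = p.filter (fun y => decide (y ∉ pvBlocksDefaultOrder)) := by
      simp [List.filter_append, hxo]
    rw [this]
  · -- x has no priority index: it goes to the very end
    have hall : ∀ y ∈ pvBlocksDefaultOrder.filter (fun o => decide (o ∈ p))
        ++ p.filter (fun y => decide (y ∉ pvBlocksDefaultOrder)), pvBefore x y = false := by
      intro y hy
      rcases List.mem_append.mp hy with h | h
      · exact pv_before_out x y hxo (Or.inl (List.mem_of_mem_filter h))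
      · exact pv_before_out x y hxo (Or.inr (by simpa using List.of_mem_filter h))
    rw [PySem.List.insertBy_of_forall_not_before _ _ _ hall]
    have h1 : pvBlocksDefaultOrder.filter (fun o => decide (o ∈ p ++ [x]))
        = pvBlocksDefaultOrder.filter (fun o => decide (o ∈ p)) := by
      refine List.filter_congr (fun o ho => ?_)
      have : o ≠ x := fun h => hxo (h ▸ ho)
      simp [this]
    have h2 : (p ++ [x]).filter (fun y => decide (y ∉ pvBlocksDefaultOrder))
        = p.filter (fun y => decide (y ∉ pvBlocksDefaultOrder)) ++ [x] := by
      simp [List.filter_append, hxo]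
    rw [h1, h2, ← List.append_assoc]

theorem pv_foldl_insert_canon :
    ∀ (xs p : List String), (p ++ xs).Nodup →
    xs.foldl (fun acc x => PySem.List.insertBy pvBefore x acc) (pvCanon p) = pvCanon (p ++ xs) := by
  intro xs
  induction xs with
  | nil => intro p _; simp
  | cons x xs ih =>
    intro p hnd
    have hxp : x ∉ p := by
      intro hmem
      exact (List.nodup_append.mp hnd).2.2 x hmem x (by simp) rfl
    have step := pv_insert_canon x p hxp
    simp only [List.foldl_cons]
    rw [step]
    have : (p ++ [x]) ++ xs = p ++ x :: xs := by simp
    rw [ih (p ++ [x]) (by rw [this]; exact hnd), this]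

theorem pv_alt_eq_canon (block_names : List String) :
    sort_blocks_default_alt block_names
      = pvCanon (PySem.List.dedup (block_names.map PySem.Str.upper)) := by
  unfold sort_blocks_default_alt
  rw [PySem.List.sorted_eq_foldl_insertBy]
  have h0 : pvCanon [] = [] := by simp [pvCanon]
  have := pv_foldl_insert_canon (PySem.List.dedup (block_names.map PySem.Str.upper)) []
      (by simp)
  rw [h0] at this
  simpa [pvBefore] using this

theorem pv_fromkeys_items :
    ∀ (ks : List String) (d : PySem.Dict String Bool) (S : List String),
    d.items = S.map (fun k => (k, false)) →
    ((ks.map (fun k => (k, false))).foldl (fun acc p => acc.insert p.1 p.2) d).items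
      = (PySem.Set.update S ks).map (fun k => (k, false)) := by
  intro ks
  induction ks with
  | nil => intro d S h; simpa [PySem.Set.update] using h
  | cons k ks ih =>
    intro d S h
    have hkeys : d.keys = S := by simp [PySem.Dict.keys, h, Function.comp_def]
    simp only [List.map_cons, List.foldl_cons]
    by_cases hm : k ∈ S
    · have hc : d.contains k = true :=
        (PySem.Dict.contains_iff_mem_keys d k).mpr (hkeys ▸ hm)
      have hit : (d.insert k false).items = S.map (fun k => (k, false)) := by
        rw [PySem.Dict.items_insert_of_contains d false hc, h, List.map_map]
        refine List.map_congr_left (fun s hs => ?_)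
        by_cases hsk : s = k <;> simp [hsk]
      rw [ih _ S hit, PySem.Set.update_cons, PySem.Set.add_of_mem hm]
    · have hc : d.contains k = false := by
        cases hcc : d.contains k with
        | false => rfl
        | true => exact absurd (hkeys ▸ (PySem.Dict.contains_iff_mem_keys d k).mp hcc) hm
      have hit : (d.insert k false).items = (S ++ [k]).map (fun k => (k, false)) := by
        rw [PySem.Dict.items_insert_of_not_contains d false hc, h]; simp
      rw [ih _ (S ++ [k]) hit, PySem.Set.update_cons, PySem.Set.add_of_not_mem hm]

theorem pv_ofList_items (ks : List String) :
    (PySem.Dict.ofList (ks.map (fun k => (k, false)))).items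
      = (PySem.List.dedup ks).map (fun k => (k, false)) := by
  have h0 : (PySem.Dict.empty : PySem.Dict String Bool).items
      = ([] : List String).map (fun k => (k, false)) := rfl
  have := pv_fromkeys_items ks PySem.Dict.empty [] h0
  simpa [PySem.Dict.ofList, PySem.Dict.update, PySem.Set.update_nil_left] using this

theorem pv_loop_items (bn D : List String) (hD : ∀ k, k ∈ D ↔ k ∈ bn) :
    ∀ (O : List String) (f : String → Bool) (d : PySem.Dict String Bool),
    d.items = D.map (fun k => (k, f k)) →
    (O.foldl (fun d name => if name ∈ bn then d.insert name true else d) d).items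
      = D.map (fun k => (k, f k || decide (k ∈ O ∧ k ∈ bn))) := by
  intro O
  induction O with
  | nil =>
    intro f d h
    simpa using h
  | cons name O ih =>
    intro f d h
    by_cases hn : name ∈ bn
    · have hnD : name ∈ D := (hD name).mpr hn
      have hkeys : d.keys = D := by simp [PySem.Dict.keys, h, Function.comp_def]
      have hc : d.contains name = true :=
        (PySem.Dict.contains_iff_mem_keys d name).mpr (hkeys ▸ hnD)
      have hit : (d.insert name true).items
          = D.map (fun k => (k, if k = name then true else f k)) := by
        rw [PySem.Dict.items_insert_of_contains d true hc, h, List.map_map]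
        refine List.map_congr_left (fun s hs => ?_)
        by_cases hsk : s = name <;> simp [hsk]
      simp only [List.foldl_cons, if_pos hn]
      rw [ih (fun k => if k = name then true else f k) _ hit]
      refine List.map_congr_left (fun s hs => ?_)
      by_cases hsk : s = name
      · simp [hsk, hn]
      · simp [hsk, List.mem_cons]
    · simp only [List.foldl_cons, if_neg hn]
      rw [ih f d h]
      refine List.map_congr_left (fun s hs => ?_)
      have hsn : s ≠ name := fun e => hn (e ▸ (hD s).mp hs)
      simp [List.mem_cons, hsn]

theorem pv_a_eq (block_names : List String) :
    sort_blocks_default block_names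
      = pvBlocksDefaultOrder.filter (fun o => decide (o ∈ block_names.map PySem.Str.upper))
        ++ (PySem.List.dedup (block_names.map PySem.Str.upper)).filter
             (fun y => decide (y ∉ pvBlocksDefaultOrder)) := by
  simp only [sort_blocks_default]
  rw [pv_upper_order]
  rw [show (fun (st : List String × PySem.Dict String Bool) name =>
        if name ∈ block_names.map PySem.Str.upper then (st.1 ++ [name], st.2.insert name true)
        else st)
      = (fun (st : List String × PySem.Dict String Bool) name =>
          (if name ∈ block_names.map PySem.Str.upper then st.1 ++ [name] else st.1,
           if name ∈ block_names.map PySem.Str.upper then st.2.insert name true else st.2)) by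
    funext st name; by_cases h : name ∈ block_names.map PySem.Str.upper <;> simp [h]]
  rw [PySem.List.foldl_prod_mk
      (f := fun acc name => if name ∈ block_names.map PySem.Str.upper then acc ++ [name] else acc)
      (g := fun d name => if name ∈ block_names.map PySem.Str.upper then
              PySem.Dict.insert d name true else d)]
  have h1 : pvBlocksDefaultOrder.foldl
      (fun acc name => if name ∈ block_names.map PySem.Str.upper then acc ++ [name] else acc) []
      = pvBlocksDefaultOrder.filter (fun o => decide (o ∈ block_names.map PySem.Str.upper)) := by
    rw [show (fun (acc : List String) name =>
          if name ∈ block_names.map PySem.Str.upper then acc ++ [name] else acc)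
        = (fun acc name =>
            if (fun n => decide (n ∈ block_names.map PySem.Str.upper)) name = true
            then acc ++ [id name] else acc) by
      funext acc name; by_cases h : name ∈ block_names.map PySem.Str.upper <;> simp [h]]
    rw [PySem.List.foldl_append_if]
    simp
  have h2 := pv_loop_items (block_names.map PySem.Str.upper)
      (PySem.List.dedup (block_names.map PySem.Str.upper))
      (fun k => PySem.List.mem_dedup (block_names.map PySem.Str.upper) k)
      pvBlocksDefaultOrder (fun _ => false) _
      (pv_ofList_items (block_names.map PySem.Str.upper))
  rw [h1, h2]
  congr 1
  rw [List.filter_map, List.map_map]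
  have h3 : (PySem.List.dedup (block_names.map PySem.Str.upper)).filter
        ((fun (kv : String × Bool) => !kv.2) ∘ fun k =>
          (k, false || decide (k ∈ pvBlocksDefaultOrder ∧ k ∈ block_names.map PySem.Str.upper)))
      = (PySem.List.dedup (block_names.map PySem.Str.upper)).filter
          (fun y => decide (y ∉ pvBlocksDefaultOrder)) := by
    refine List.filter_congr (fun k hk => ?_)
    have hkbn : k ∈ block_names.map PySem.Str.upper := by
      have := hk; rwa [PySem.List.mem_dedup] at this
    have hiff : (k ∈ pvBlocksDefaultOrder ∧ k ∈ block_names.map PySem.Str.upper)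
        = (k ∈ pvBlocksDefaultOrder) :=
      propext ⟨And.left, fun h => ⟨h, hkbn⟩⟩
    simp only [Function.comp_apply, Bool.false_or, hiff]
    simp [decide_not]
  rw [h3]
  rw [show ((fun (kv : String × Bool) => kv.1) ∘ fun k =>
        (k, false || decide (k ∈ pvBlocksDefaultOrder ∧ k ∈ block_names.map PySem.Str.upper)))
      = fun (k : String) => k from rfl]
  exact List.map_id _

-- ===== VERDICT (by name: the statement is the Claim_ definition above) =====
theorem sort_blocks_default_spec : Claim_equal_sort_blocks_default := by
  intro block_names _
  unfold Spec_sort_blocks_default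
  rw [pv_a_eq, pv_alt_eq_canon]
  unfold pvCanon
  congr 1
  exact (List.filter_congr (fun o _ => by
    simp)).symm
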